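-- pv_equiv track=rewrite | github.com/sajiko5821/Advent-of-Code-2025 | day04/solution.py | part2
-- ===== SOURCE A (Python) =====
-- def get_cell(grid: list[list[str]], row: int, col: int) -> str:
--     """Returns value of cell using 0-based indices."""
--     return grid[row][col]
--
-- def get_neighbors(grid: list[list[str]], row: int, col: int):
--     """Returns list of neighbor cell values (8-neighborhood)."""
--     neighbors = [(-1, -1), (-1, 0), (-1, 1),
--                 (0, -1),            (0, 1),
--                 (1, -1),    (1, 0), (1, 1)]
--
--     for row_offset, col_offset in neighbors:
--         neighbor_row, neighbor_col = row + row_offset, col + col_offset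
--         if 0 <= neighbor_row < len(grid) and 0 <= neighbor_col < len(grid[0]):
--             yield grid[neighbor_row][neighbor_col]
--
-- def part2(grid: list[list[str]]) -> int:
--     """Perform rounds of moving rolls until no more can be moved.
--
--     In each round collect all '@' cells that have fewer than 4 '@' neighbors,
--     then mark them as moved (set to '.'). Repeat rounds until
--     a round moves zero cells. Return the total number of moved rolls.
--     """
--     total_moved = 0
--     round_no = 0
--     while True:
--         round_no += 1
--         to_move: list[tuple[int, int]] = []
--
--         # Scan grid and collect moves for this round
--         for row in range(len(grid)):
--             for col in range(len(grid[0])):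
--                 if get_cell(grid, row, col) != '@':
--                     continue
--                 neighbors = list(get_neighbors(grid, row, col))
--                 paper_neighbors = []
--                 for neighbor in neighbors:
--                     if neighbor == '@':
--                         paper_neighbors.append(neighbor)
--                 if len(paper_neighbors) < 4:
--                     to_move.append((row, col))
--
--         # Apply moves
--         moved_this_round = 0
--         for r, c in to_move:
--             grid[r][c] = '.'
--             moved_this_round += 1
--
--         if moved_this_round == 0:
--             break
--
--         total_moved += moved_this_round
--
--     return total_moved
-- ===== SOURCE B (Python) =====
-- OFFSETS = ((-1, -1), (-1, 0), (-1, 1), (0, -1), (0, 1), (1, -1), (1, 0), (1, 1))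
--
-- def part2(grid: list[list[str]]) -> int:
--     """Count how many '@' cells eventually get removed: a cell is removable while
--     it has fewer than 4 still-present '@' neighbours.  The surviving set is the
--     maximal 4-core, which is independent of removal order, so peel cells one at a
--     time with a worklist (revisiting only neighbours of removed cells) instead of
--     rescanning the whole grid round after round.
--     (Return value only: unlike A, this does not mutate grid.)"""
--     rows = len(grid)
--     cols = len(grid[0]) if rows else 0
--     alive = set()
--     work = []
--     for r in range(rows):
--         for c in range(cols):
--             if grid[r][c] == '@':
--                 alive.add((r, c))
--                 work.append((r, c))
--     removed = set()
--     i = 0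
--     while i < len(work):
--         r, c = work[i]
--         i += 1
--         if (r, c) in removed:
--             continue
--         deg = sum(1 for dr, dc in OFFSETS
--                   if (r + dr, c + dc) in alive and (r + dr, c + dc) not in removed)
--         if deg < 4:
--             removed.add((r, c))
--             for dr, dc in OFFSETS:
--                 q = (r + dr, c + dc)
--                 if q in alive and q not in removed:
--                     work.append(q)
--     return len(removed)
-- ===== Notes on version B (the rewrite author's own statement) =====
-- stated objective: alternative
-- what changed: A rescans the whole grid round after round, synchronously removing every '@' cell with fewer than 4 '@' neighbours until a round removes none; B computes the same total in a single worklist peeling pass (the survivors form the maximal 4-core, which is independent of removal order), re-examining a cell only when a neighbour is removed. B does not mutate grid (A sets removed cells to '.' in place); the equivalence is about the return value.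
import Mathlib
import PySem

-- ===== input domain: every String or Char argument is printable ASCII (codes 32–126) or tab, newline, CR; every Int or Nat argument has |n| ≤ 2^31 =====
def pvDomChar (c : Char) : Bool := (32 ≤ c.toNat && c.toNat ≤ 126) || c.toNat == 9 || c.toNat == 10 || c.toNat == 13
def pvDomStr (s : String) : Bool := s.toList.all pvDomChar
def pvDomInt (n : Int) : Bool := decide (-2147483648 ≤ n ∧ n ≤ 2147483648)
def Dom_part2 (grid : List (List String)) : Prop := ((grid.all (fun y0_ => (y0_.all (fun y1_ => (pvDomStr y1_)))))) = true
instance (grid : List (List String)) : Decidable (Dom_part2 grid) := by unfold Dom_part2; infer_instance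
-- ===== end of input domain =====

-- B replaces A's round-after-round full-grid rescan by one worklist peeling pass (same return value;
-- B's port, like B, does not mutate its argument — A sets removed cells to '.' in place, the claim is about the return value).

-- ===== PORT A =====
-- get_cell: grid[row][col]; out-of-range reads return "" here (Python raises there; Pre_part2 excludes those inputs)
def pvCell (grid : List (List String)) (row col : Int) : String :=
  PySem.List.pyGetD (PySem.List.pyGetD grid row []) col ""

-- the `neighbors` offset table of get_neighbors
def pvOffsets : List (Int × Int) :=
  [(-1,-1),(-1,0),(-1,1),(0,-1),(0,1),(1,-1),(1,0),(1,1)]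

-- get_neighbors: values of the in-bounds 8-neighbours
def pvNeighbors (grid : List (List String)) (row col : Int) : List String :=
  pvOffsets.foldl (fun acc o =>
    if 0 ≤ row + o.1 ∧ row + o.1 < (grid.length : Int)
        ∧ 0 ≤ col + o.2 ∧ col + o.2 < ((grid.headD []).length : Int)
    then acc ++ [pvCell grid (row + o.1) (col + o.2)] else acc) []

-- one round's scan: collect the '@' cells with fewer than 4 '@' neighbours
def pvToMove (grid : List (List String)) : List (Int × Int) :=
  (PySem.List.pyRange 0 (grid.length : Int) 1).foldl (fun acc row =>
    (PySem.List.pyRange 0 ((grid.headD []).length : Int) 1).foldl (fun acc col =>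
      if pvCell grid row col ≠ "@" then acc
      else if ((pvNeighbors grid row col).foldl
                 (fun ps n => if n = "@" then ps ++ [n] else ps) []).length < 4
      then acc ++ [(row, col)] else acc) acc) []

-- grid[r][c] = '.'
def pvSetDot (grid : List (List String)) (r c : Int) : List (List String) :=
  PySem.List.pySetD grid r (PySem.List.pySetD (PySem.List.pyGetD grid r []) c ".")

-- termination measure for the while-loop: number of '@' cells left
def pvAts (grid : List (List String)) : Nat :=
  (grid.map (fun row => row.count "@")).sum

-- ---- termination support for pvLoopA (cited by its decreasing_by) ----
theorem pv_toMove_eq_flatMap (grid : List (List String)) :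
    pvToMove grid =
      (PySem.List.pyRange 0 (grid.length : Int) 1).flatMap (fun row =>
        ((PySem.List.pyRange 0 ((grid.headD []).length : Int) 1).filter (fun col =>
            decide (pvCell grid row col = "@") &&
            decide (((pvNeighbors grid row col).foldl
                 (fun ps n => if n = "@" then ps ++ [n] else ps) []).length < 4))).map
          (fun col => (row, col))) := by
  have inner : ∀ (acc : List (Int × Int)) (row : Int),
      (PySem.List.pyRange 0 ((grid.headD []).length : Int) 1).foldl (fun acc col =>
        if pvCell grid row col ≠ "@" then acc
        else if ((pvNeighbors grid row col).foldl
                   (fun ps n => if n = "@" then ps ++ [n] else ps) []).length < 4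
        then acc ++ [(row, col)] else acc) acc
      = acc ++ ((PySem.List.pyRange 0 ((grid.headD []).length : Int) 1).filter (fun col =>
            decide (pvCell grid row col = "@") &&
            decide (((pvNeighbors grid row col).foldl
                 (fun ps n => if n = "@" then ps ++ [n] else ps) []).length < 4))).map
          (fun col => (row, col)) := by
    intro acc row
    rw [← PySem.List.foldl_append_if _ (fun col => (row, col))]
    apply PySem.List.foldl_congr_mem
    intro acc c _
    by_cases h1 : pvCell grid row c = "@" <;>
      by_cases h2 : ((pvNeighbors grid row c).foldl
        (fun ps n => if n = "@" then ps ++ [n] else ps) []).length < 4 <;>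
      simp [h1, h2]
  unfold pvToMove
  rw [PySem.List.foldl_congr_mem _ _
    (fun acc row => acc ++ ((PySem.List.pyRange 0 ((grid.headD []).length : Int) 1).filter (fun col =>
            decide (pvCell grid row col = "@") &&
            decide (((pvNeighbors grid row col).foldl
                 (fun ps n => if n = "@" then ps ++ [n] else ps) []).length < 4))).map
          (fun col => (row, col))) _ (fun acc row _ => inner acc row)]
  rw [PySem.List.foldl_append_eq_flatMap]
  simp

theorem pv_toMove_mem {grid : List (List String)} {p : Int × Int} (hp : p ∈ pvToMove grid) :
    0 ≤ p.1 ∧ p.1 < (grid.length : Int) ∧ 0 ≤ p.2 ∧ p.2 < ((grid.headD []).length : Int) ∧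
      pvCell grid p.1 p.2 = "@" := by
  rw [pv_toMove_eq_flatMap] at hp
  simp only [List.mem_flatMap, List.mem_map, List.mem_filter,
    PySem.List.mem_pyRange_one, Bool.and_eq_true, decide_eq_true_eq] at hp
  obtain ⟨row, hrow, col, ⟨hcol, hcell, _⟩, hpe⟩ := hp
  subst hpe
  exact ⟨hrow.1, hrow.2, hcol.1, hcol.2, hcell⟩

theorem pv_count_set_le (row : List String) (m : Nat) :
    (row.set m ".").count "@" ≤ row.count "@" := by
  induction row generalizing m with
  | nil => simp
  | cons a t ih =>
    cases m with
    | zero => simp [List.count_cons]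
    | succ m => simpa [List.count_cons] using ih m

theorem pv_count_set_lt (row : List String) (m : Nat) (h : row.getD m "" = "@") :
    (row.set m ".").count "@" < row.count "@" := by
  induction row generalizing m with
  | nil => simp at h
  | cons a t ih =>
    cases m with
    | zero => simp at h; simp [h]
    | succ m => simp only [List.getD_cons_succ] at h
                have := ih m h
                simp [List.count_cons]; omega

theorem pv_ats_setDot_le (grid : List (List String)) (r c : Int) (hr : 0 ≤ r) (hc : 0 ≤ c) :
    pvAts (pvSetDot grid r c) ≤ pvAts grid := by
  unfold pvSetDot
  rw [PySem.List.pySetD_of_nonneg _ _ hr, PySem.List.pySetD_of_nonneg _ _ hc,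
    PySem.List.pyGetD_of_nonneg _ _ hr]
  generalize r.toNat = k
  generalize c.toNat = m
  induction grid generalizing k with
  | nil => simp
  | cons row t ih =>
    cases k with
    | zero => simpa [pvAts] using pv_count_set_le row m
    | succ k => simpa [pvAts] using ih k

theorem pv_ats_setDot_lt (grid : List (List String)) (r c : Int) (hr : 0 ≤ r) (hc : 0 ≤ c)
    (h : pvCell grid r c = "@") : pvAts (pvSetDot grid r c) < pvAts grid := by
  unfold pvSetDot
  unfold pvCell at h
  rw [PySem.List.pyGetD_of_nonneg _ _ hr, PySem.List.pyGetD_of_nonneg _ _ hc] at h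
  rw [PySem.List.pySetD_of_nonneg _ _ hr, PySem.List.pySetD_of_nonneg _ _ hc,
    PySem.List.pyGetD_of_nonneg _ _ hr]
  generalize hk : r.toNat = k at h ⊢
  generalize hm : c.toNat = m at h ⊢
  clear hk hm hr hc
  induction grid generalizing k with
  | nil => simp at h
  | cons row t ih =>
    cases k with
    | zero => simp only [List.getD_cons_zero] at h
              simpa [pvAts] using pv_count_set_lt row m h
    | succ k => simp only [List.getD_cons_succ] at h
                simpa [pvAts] using ih _ h

theorem pv_ats_foldl_le (l : List (Int × Int)) (grid : List (List String))
    (hl : ∀ p ∈ l, 0 ≤ p.1 ∧ 0 ≤ p.2) :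
    pvAts (l.foldl (fun g p => pvSetDot g p.1 p.2) grid) ≤ pvAts grid := by
  induction l generalizing grid with
  | nil => simp
  | cons p t ih =>
    simp only [List.foldl_cons]
    exact le_trans (ih _ (fun q hq => hl q (List.mem_cons_of_mem _ hq)))
      (pv_ats_setDot_le grid p.1 p.2 (hl p (List.mem_cons_self)).1 (hl p (List.mem_cons_self)).2)

theorem pv_ats_dec (grid : List (List String)) (h : ¬ (pvToMove grid).length = 0) :
    pvAts ((pvToMove grid).foldl (fun g p => pvSetDot g p.1 p.2) grid) < pvAts grid := by
  rcases he : pvToMove grid with _ | ⟨p, t⟩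
  · simp [he] at h
  · have hp := pv_toMove_mem (grid := grid) (p := p) (by rw [he]; exact List.mem_cons_self)
    have ht : ∀ q ∈ t, 0 ≤ q.1 ∧ 0 ≤ q.2 := by
      intro q hq
      have := pv_toMove_mem (grid := grid) (p := q) (by rw [he]; exact List.mem_cons_of_mem _ hq)
      exact ⟨this.1, this.2.2.1⟩
    simp only [List.foldl_cons]
    exact lt_of_le_of_lt (pv_ats_foldl_le t _ ht)
      (pv_ats_setDot_lt grid p.1 p.2 hp.1 hp.2.2.1 hp.2.2.2.2)
-- ---- end termination support ----

-- the `while True` loop of part2 (round_no is unused in A and dropped)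
def pvLoopA (grid : List (List String)) (total : Int) : Int :=
  if (pvToMove grid).length = 0 then total
  else pvLoopA ((pvToMove grid).foldl (fun g p => pvSetDot g p.1 p.2) grid)
         (total + ((pvToMove grid).length : Int))
termination_by pvAts grid
decreasing_by exact pv_ats_dec grid (by assumption)

def part2 (grid : List (List String)) : Int := pvLoopA grid 0

-- ===== PORT B =====
-- OFFSETS
def pvOffsetsB : List (Int × Int) :=
  [(-1,-1),(-1,0),(-1,1),(0,-1),(0,1),(1,-1),(1,0),(1,1)]

-- grid[r][c] (same read semantics as A's get_cell; Pre_part2 keeps it in range)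
def pvCellB (grid : List (List String)) (row col : Int) : String :=
  PySem.List.pyGetD (PySem.List.pyGetD grid row []) col ""

-- first scan: the alive set and the initial worklist
def pvBuildB (grid : List (List String)) : PySem.Set (Int × Int) × List (Int × Int) :=
  (PySem.List.pyRange 0 (grid.length : Int) 1).foldl (fun st r =>
    (PySem.List.pyRange 0 ((grid.headD []).length : Int) 1).foldl (fun st c =>
      if pvCellB grid r c = "@" then (PySem.Set.add st.1 (r, c), st.2 ++ [(r, c)]) else st) st)
    (PySem.Set.empty, [])

-- deg = sum(1 for dr, dc in OFFSETS if ... in alive and ... not in removed)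
def pvDegB (alive removed : PySem.Set (Int × Int)) (r c : Int) : Int :=
  pvOffsetsB.foldl (fun deg o =>
    if PySem.Set.contains alive (r + o.1, c + o.2) &&
        !PySem.Set.contains removed (r + o.1, c + o.2)
    then deg + 1 else deg) 0

-- the inner append loop after a removal
def pvPushB (alive removed : PySem.Set (Int × Int)) (r c : Int)
    (work : List (Int × Int)) : List (Int × Int) :=
  pvOffsetsB.foldl (fun w o =>
    if PySem.Set.contains alive (r + o.1, c + o.2) &&
        !PySem.Set.contains removed (r + o.1, c + o.2)
    then w ++ [(r + o.1, c + o.2)] else w) work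

-- termination measure: still-alive unremoved cells
def pvMeasureB (alive removed : PySem.Set (Int × Int)) : Nat :=
  (alive.filter (fun q => !PySem.Set.contains removed q)).length

-- ---- termination support for pvLoopB (cited by its decreasing_by) ----
theorem pv_countP_strict {α : Type} (l : List α) (p q : α → Bool)
    (hpq : ∀ x, q x = true → p x = true) (a : α) (ha : a ∈ l) (hp : p a = true)
    (hq : ¬ q a = true) : l.countP q < l.countP p := by
  induction l with
  | nil => simp at ha
  | cons b t ih =>
    rcases List.mem_cons.1 ha with rfl | hat
    · have hle : t.countP q ≤ t.countP p := List.countP_mono_left (fun x _ => hpq x)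
      simp only [List.countP_cons, hp, if_pos]
      rw [if_neg hq]
      omega
    · have := ih hat
      have hd : (if q b = true then 1 else 0) ≤ (if p b = true then 1 else 0) := by
        by_cases hb : q b = true
        · simp [hb, hpq b hb]
        · simp [hb]
      simp only [List.countP_cons]
      omega

theorem pv_measureB_lt (alive removed : PySem.Set (Int × Int)) (p : Int × Int)
    (hp : PySem.Set.contains alive p = true) (hr : PySem.Set.contains removed p = false) :
    pvMeasureB alive (PySem.Set.add removed p) < pvMeasureB alive removed := by
  have hnm : p ∉ removed := by
    intro hm
    rw [(PySem.Set.contains_iff removed p).2 hm] at hr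
    cases hr
  unfold pvMeasureB
  rw [PySem.Set.add_of_not_mem hnm]
  rw [← List.countP_eq_length_filter, ← List.countP_eq_length_filter]
  refine pv_countP_strict alive _ _ (fun x hx => ?_) p
    ((PySem.Set.contains_iff alive p).1 hp) ?_ ?_
  · simp only [Bool.not_eq_true', PySem.Set.contains_eq_listContains] at hx ⊢
    simp only [List.contains_eq_mem, decide_eq_false_iff_not, List.mem_append] at hx ⊢
    exact fun hmem => hx (Or.inl hmem)
  · simpa using hr
  · simp
-- ---- end termination support ----

-- the worklist loop; 'p ∉ alive' cannot occur on the states pvLoopB is actually run on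
-- (the worklist only ever receives members of alive) — the extra disjunct only makes termination evident
def pvLoopB (alive removed : PySem.Set (Int × Int)) (work : List (Int × Int)) : Int :=
  match work with
  | [] => (removed.length : Int)
  | p :: rest =>
    if PySem.Set.contains removed p || !PySem.Set.contains alive p then
      pvLoopB alive removed rest
    else if pvDegB alive removed p.1 p.2 < 4 then
      pvLoopB alive (PySem.Set.add removed p)
        (pvPushB alive (PySem.Set.add removed p) p.1 p.2 rest)
    else pvLoopB alive removed rest
termination_by (pvMeasureB alive removed, work.length)
decreasing_by
  · exact Prod.Lex.right _ (Nat.lt_succ_self _)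
  · exact Prod.Lex.left _ _ (pv_measureB_lt alive removed p (by
      rename_i hguard _
      simp only [Bool.or_eq_true, Bool.not_eq_true'] at hguard
      push Not at hguard
      simpa using hguard.2) (by
      rename_i hguard _
      simp only [Bool.or_eq_true, Bool.not_eq_true'] at hguard
      push Not at hguard
      simpa using hguard.1))
  · exact Prod.Lex.right _ (Nat.lt_succ_self _)

def part2_alt (grid : List (List String)) : Int :=
  pvLoopB (pvBuildB grid).1 PySem.Set.empty (pvBuildB grid).2

-- ===== PRECONDITION & SPEC =====
-- Pre_part2 is exactly where the Python A returns: A raises IndexError iff some row is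
-- shorter than row 0 and the scan reaches its missing columns (B raises on the same inputs).
def Pre_part2 (grid : List (List String)) : Prop :=
  ∀ row ∈ grid, (grid.headD []).length ≤ row.length
instance (grid : List (List String)) : Decidable (Pre_part2 grid) := by
  unfold Pre_part2; infer_instance

def pvWitness_part2 : List (List String) := [["@", "."], [".", "@"]]

def Spec_part2 (grid : List (List String)) (out : Int) : Prop := out = part2_alt grid
instance (grid : List (List String)) (out : Int) : Decidable (Spec_part2 grid out) := by
  unfold Spec_part2; infer_instance

-- ===== CLAIM (what is proved, stated in full; the proofs are below) =====
def Claim_equal_part2 : Prop :=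
  ∀ (grid : List (List String)), Dom_part2 grid → Pre_part2 grid → Spec_part2 grid (part2 grid)

-- ===== LEMMAS AND PROOFS =====

-- ---- the abstract layer: degrees and the maximal 4-core of a set of cells ----
def pvDeg (S : Finset (Int × Int)) (p : Int × Int) : Nat :=
  (pvOffsets.filter (fun o => decide ((p.1 + o.1, p.2 + o.2) ∈ S))).length

def pvIsCore (T : Finset (Int × Int)) : Prop := ∀ p ∈ T, 4 ≤ pvDeg T p

def pvMaxCore (S : Finset (Int × Int)) : Finset (Int × Int) :=
  (S.powerset.filter (fun T => ∀ p ∈ T, 4 ≤ pvDeg T p)).sup id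

-- the value both programs compute: |S| - |maximal 4-core of S|
def pvAnsZ (S : Finset (Int × Int)) : Int := (S.card : Int) - ((pvMaxCore S).card : Int)

theorem pvDeg_mono {T S : Finset (Int × Int)} (h : T ⊆ S) (p : Int × Int) :
    pvDeg T p ≤ pvDeg S p := by
  unfold pvDeg
  rw [← List.countP_eq_length_filter, ← List.countP_eq_length_filter]
  refine List.countP_mono_left (fun o _ ho => ?_)
  simp only [decide_eq_true_eq] at ho ⊢
  exact h ho

theorem pvMaxCore_subset (S : Finset (Int × Int)) : pvMaxCore S ⊆ S := by
  have h : pvMaxCore S ≤ S := by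
    apply Finset.sup_le
    intro T hT
    rw [Finset.mem_filter] at hT
    exact Finset.mem_powerset.1 hT.1
  exact h

theorem pv_subset_maxCore {T S : Finset (Int × Int)} (hcore : pvIsCore T) (hTS : T ⊆ S) :
    T ⊆ pvMaxCore S := by
  have h : T ≤ pvMaxCore S := by
    refine Finset.le_sup (f := id) ?_
    rw [Finset.mem_filter]
    exact ⟨Finset.mem_powerset.2 hTS, hcore⟩
  exact h

theorem pvIsCore_maxCore (S : Finset (Int × Int)) : pvIsCore (pvMaxCore S) := by
  intro p hp
  obtain ⟨T, hT, hpT⟩ := Finset.mem_sup.1 hp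
  rw [Finset.mem_filter] at hT
  have h1 : pvIsCore T := hT.2
  have hTS : T ⊆ S := Finset.mem_powerset.1 hT.1
  exact le_trans (h1 p hpT) (pvDeg_mono (pv_subset_maxCore h1 hTS) p)

theorem pvMaxCore_eq_self {S : Finset (Int × Int)} (h : pvIsCore S) : pvMaxCore S = S :=
  Finset.Subset.antisymm (pvMaxCore_subset S) (pv_subset_maxCore h (Finset.Subset.refl S))

-- peeling any set of low-degree cells leaves the maximal core unchanged
theorem pvMaxCore_sdiff {S R : Finset (Int × Int)} (hR : ∀ p ∈ R, p ∈ S ∧ pvDeg S p < 4) :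
    pvMaxCore (S \ R) = pvMaxCore S := by
  apply Finset.Subset.antisymm
  · exact pv_subset_maxCore (pvIsCore_maxCore _)
      (Finset.Subset.trans (pvMaxCore_subset _) Finset.sdiff_subset)
  · apply pv_subset_maxCore (pvIsCore_maxCore S)
    intro p hp
    rw [Finset.mem_sdiff]
    refine ⟨pvMaxCore_subset S hp, fun hpR => ?_⟩
    have h4 := pvIsCore_maxCore S p hp
    have h5 := pvDeg_mono (pvMaxCore_subset S) p
    have h6 := (hR p hpR).2
    omega

-- ---- the '@' cells of a grid, as a list (scan order) and as a Finset ----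
def pvPairs (grid : List (List String)) : List (Int × Int) :=
  (PySem.List.pyRange 0 (grid.length : Int) 1).flatMap (fun r =>
    (PySem.List.pyRange 0 ((grid.headD []).length : Int) 1).map (fun c => (r, c)))

theorem pv_mem_pairs {grid : List (List String)} {q : Int × Int} :
    q ∈ pvPairs grid ↔ 0 ≤ q.1 ∧ q.1 < (grid.length : Int) ∧
      0 ≤ q.2 ∧ q.2 < ((grid.headD []).length : Int) := by
  simp only [pvPairs, List.mem_flatMap, List.mem_map, PySem.List.mem_pyRange_one]
  constructor
  · rintro ⟨r, hr, c, hc, rfl⟩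
    exact ⟨hr.1, hr.2, hc.1, hc.2⟩
  · rintro ⟨h1, h2, h3, h4⟩
    exact ⟨q.1, ⟨h1, h2⟩, q.2, ⟨h3, h4⟩, rfl⟩

theorem pv_nodup_pairs (grid : List (List String)) : (pvPairs grid).Nodup := by
  apply List.nodup_flatMap.2
  constructor
  · intro r _
    exact (PySem.List.nodup_pyRange_one _ _).map (fun a b h => by injection h)
  · refine (PySem.List.pairwise_lt_pyRange_one _ _).imp ?_
    intro a b hab q hqa hqb
    simp only [List.mem_map] at hqa hqb
    obtain ⟨c1, _, rfl⟩ := hqa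
    obtain ⟨c2, _, h2⟩ := hqb
    have : b = a := congrArg Prod.fst h2
    omega

def pvAliveL (grid : List (List String)) : List (Int × Int) :=
  (pvPairs grid).filter (fun q => decide (pvCell grid q.1 q.2 = "@"))

def pvGridAts (grid : List (List String)) : Finset (Int × Int) := (pvAliveL grid).toFinset

theorem pv_nodup_aliveL (grid : List (List String)) : (pvAliveL grid).Nodup :=
  (pv_nodup_pairs grid).filter _

theorem pv_mem_gridAts {grid : List (List String)} {q : Int × Int} :
    q ∈ pvGridAts grid ↔ (0 ≤ q.1 ∧ q.1 < (grid.length : Int) ∧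
      0 ≤ q.2 ∧ q.2 < ((grid.headD []).length : Int)) ∧ pvCell grid q.1 q.2 = "@" := by
  simp [pvGridAts, pvAliveL, pv_mem_pairs, and_assoc]

-- ---- port A, one round abstractly ----
-- the '@'-collecting loop over any value list counts the '@'s
theorem pv_collect_len (L : List String) :
    ((L.foldl (fun ps n => if n = "@" then ps ++ [n] else ps) []).length)
      = L.countP (fun n => n == "@") := by
  rw [PySem.List.foldl_congr_mem L _
      (fun ps n => if (n == "@") = true then ps ++ [(fun x => x) n] else ps) []
      (by intro acc n _; by_cases h : n = "@" <;> simp [h]),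
    PySem.List.foldl_append_if, List.countP_eq_length_filter]
  simp

theorem pv_neighbors_eq (grid : List (List String)) (r c : Int) :
    pvNeighbors grid r c = (pvOffsets.filter (fun o =>
        decide (0 ≤ r + o.1 ∧ r + o.1 < (grid.length : Int) ∧
          0 ≤ c + o.2 ∧ c + o.2 < ((grid.headD []).length : Int)))).map
      (fun o => pvCell grid (r + o.1) (c + o.2)) := by
  unfold pvNeighbors
  rw [PySem.List.foldl_congr_mem pvOffsets _
      (fun acc o => if (decide (0 ≤ r + o.1 ∧ r + o.1 < (grid.length : Int) ∧
          0 ≤ c + o.2 ∧ c + o.2 < ((grid.headD []).length : Int))) = true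
        then acc ++ [(fun o : Int × Int => pvCell grid (r + o.1) (c + o.2)) o] else acc) []
      (by intro acc o _
          by_cases h : (0 ≤ r + o.1 ∧ r + o.1 < (grid.length : Int) ∧
            0 ≤ c + o.2 ∧ c + o.2 < ((grid.headD []).length : Int)) <;> simp [h]),
    PySem.List.foldl_append_if]
  simp

-- A's neighbour count is the degree in the '@'-cell set
theorem pv_countNb_eq (grid : List (List String)) (r c : Int) :
    ((pvNeighbors grid r c).foldl (fun ps n => if n = "@" then ps ++ [n] else ps) []).length
      = pvDeg (pvGridAts grid) (r, c) := by
  rw [pv_collect_len, pv_neighbors_eq, List.countP_map, pvDeg,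
    ← List.countP_eq_length_filter, List.countP_filter]
  refine List.countP_congr (fun o _ => ?_)
  simp only [Function.comp, beq_iff_eq, Bool.and_eq_true, decide_eq_true_eq, pv_mem_gridAts]
  tauto

theorem pv_mem_toMove {grid : List (List String)} {q : Int × Int} :
    q ∈ pvToMove grid ↔ q ∈ pvGridAts grid ∧ pvDeg (pvGridAts grid) q < 4 := by
  rw [pv_toMove_eq_flatMap]
  simp only [List.mem_flatMap, List.mem_map, List.mem_filter,
    PySem.List.mem_pyRange_one, Bool.and_eq_true, decide_eq_true_eq]
  constructor
  · rintro ⟨r, hr, c, ⟨hc, hcell, hdeg⟩, rfl⟩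
    rw [pv_countNb_eq] at hdeg
    exact ⟨pv_mem_gridAts.2 ⟨⟨hr.1, hr.2, hc.1, hc.2⟩, hcell⟩, hdeg⟩
  · rintro ⟨hmem, hdeg⟩
    obtain ⟨⟨h1, h2, h3, h4⟩, hcell⟩ := pv_mem_gridAts.1 hmem
    refine ⟨q.1, ⟨h1, h2⟩, q.2, ⟨⟨h3, h4⟩, hcell, ?_⟩, rfl⟩
    rw [pv_countNb_eq]
    exact hdeg

theorem pv_nodup_toMove (grid : List (List String)) : (pvToMove grid).Nodup := by
  rw [pv_toMove_eq_flatMap]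
  apply List.nodup_flatMap.2
  constructor
  · intro r _
    exact ((PySem.List.nodup_pyRange_one _ _).filter _).map (fun a b h => by injection h)
  · refine (PySem.List.pairwise_lt_pyRange_one _ _).imp ?_
    intro a b hab q hqa hqb
    simp only [List.mem_map, List.mem_filter] at hqa hqb
    obtain ⟨c1, _, rfl⟩ := hqa
    obtain ⟨c2, _, h2⟩ := hqb
    have : b = a := congrArg Prod.fst h2
    omega

-- ---- the effect of one round's mutation ----
theorem pv_dims_setDot (grid : List (List String)) (r c : Int) (hr : 0 ≤ r) (hc : 0 ≤ c) :
    (pvSetDot grid r c).length = grid.length ∧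
    ((pvSetDot grid r c).headD []).length = (grid.headD []).length := by
  unfold pvSetDot
  rw [PySem.List.pySetD_of_nonneg _ _ hr, PySem.List.pySetD_of_nonneg _ _ hc,
    PySem.List.pyGetD_of_nonneg _ _ hr]
  refine ⟨by simp, ?_⟩
  cases grid with
  | nil => simp
  | cons row t =>
    cases hk : r.toNat with
    | zero => simp
    | succ k => simp

theorem pv_cell_setDot_ne {grid : List (List String)} {r c r' c' : Int}
    (hr : 0 ≤ r) (hc : 0 ≤ c) (hr' : 0 ≤ r') (hc' : 0 ≤ c')
    (hne : ¬ (r' = r ∧ c' = c)) :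
    pvCell (pvSetDot grid r c) r' c' = pvCell grid r' c' := by
  unfold pvCell pvSetDot
  rw [PySem.List.pySetD_of_nonneg _ _ hr, PySem.List.pySetD_of_nonneg _ _ hc,
    PySem.List.pyGetD_of_nonneg _ _ hr, PySem.List.pyGetD_of_nonneg _ _ hr',
    PySem.List.pyGetD_of_nonneg _ _ hr', PySem.List.pyGetD_of_nonneg _ _ hc',
    PySem.List.pyGetD_of_nonneg _ _ hc']
  by_cases hrow : r'.toNat = r.toNat
  · have hre : r' = r := by omega
    have hce : ¬ c' = c := fun hcc => hne ⟨hre, hcc⟩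
    have hcn : c.toNat ≠ c'.toNat := by omega
    rw [hrow]
    by_cases hlen : r.toNat < grid.length
    · have h1 : (grid.set r.toNat ((grid.getD r.toNat []).set c.toNat ".")).getD r.toNat []
          = (grid.getD r.toNat []).set c.toNat "." := by
        rw [List.getD_eq_getElem?_getD, List.getElem?_set_self hlen]
        rfl
      rw [h1, List.getD_eq_getElem?_getD, List.getElem?_set_ne hcn,
        ← List.getD_eq_getElem?_getD]
    · rw [List.set_eq_of_length_le (by omega)]
  · have h2 : (grid.set r.toNat ((grid.getD r.toNat []).set c.toNat ".")).getD r'.toNat []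
        = grid.getD r'.toNat [] := by
      rw [List.getD_eq_getElem?_getD, List.getElem?_set_ne (by omega),
        ← List.getD_eq_getElem?_getD]
    rw [h2]

theorem pv_cell_setDot_self {grid : List (List String)} {r c : Int}
    (hr : 0 ≤ r) (hc : 0 ≤ c) : pvCell (pvSetDot grid r c) r c ≠ "@" := by
  unfold pvCell pvSetDot
  rw [PySem.List.pySetD_of_nonneg _ _ hr, PySem.List.pySetD_of_nonneg _ _ hc,
    PySem.List.pyGetD_of_nonneg _ _ hr, PySem.List.pyGetD_of_nonneg _ _ hr,
    PySem.List.pyGetD_of_nonneg _ _ hc]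
  by_cases hlen : r.toNat < grid.length
  · have h1 : (grid.set r.toNat ((grid.getD r.toNat []).set c.toNat ".")).getD r.toNat []
        = (grid.getD r.toNat []).set c.toNat "." := by
      rw [List.getD_eq_getElem?_getD, List.getElem?_set_self hlen]
      rfl
    rw [h1]
    by_cases hcl : c.toNat < (grid.getD r.toNat []).length
    · rw [List.getD_eq_getElem?_getD, List.getElem?_set_self hcl]
      simp
    · rw [List.set_eq_of_length_le (by omega), List.getD_eq_getElem?_getD,
        List.getElem?_eq_none (by omega)]
      simp
  · rw [List.set_eq_of_length_le (by omega)]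
    have h2 : grid.getD r.toNat [] = [] := by
      rw [List.getD_eq_getElem?_getD, List.getElem?_eq_none (by omega)]
      rfl
    rw [h2]
    simp

theorem pv_gridAts_setDot {grid : List (List String)} {r c : Int} (hr : 0 ≤ r) (hc : 0 ≤ c) :
    pvGridAts (pvSetDot grid r c) = pvGridAts grid \ {(r, c)} := by
  ext q
  obtain ⟨hL, hC⟩ := pv_dims_setDot grid r c hr hc
  simp only [pv_mem_gridAts, Finset.mem_sdiff, Finset.mem_singleton, hL, hC]
  by_cases hq : q = (r, c)
  · subst hq
    simp only [not_true_eq_false, and_false, iff_false, not_and]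
    intro _
    exact pv_cell_setDot_self hr hc
  · have hq' : ¬ (q.1 = r ∧ q.2 = c) := by
      intro ⟨ha, hb⟩
      exact hq (Prod.ext ha hb)
    constructor
    · rintro ⟨hb, hcell⟩
      rw [pv_cell_setDot_ne hr hc hb.1 hb.2.2.1 hq'] at hcell
      exact ⟨⟨hb, hcell⟩, hq⟩
    · rintro ⟨⟨hb, hcell⟩, _⟩
      rw [pv_cell_setDot_ne hr hc hb.1 hb.2.2.1 hq']
      exact ⟨hb, hcell⟩

theorem pv_gridAts_foldl (l : List (Int × Int)) (grid : List (List String))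
    (hl : ∀ p ∈ l, 0 ≤ p.1 ∧ 0 ≤ p.2) :
    pvGridAts (l.foldl (fun g p => pvSetDot g p.1 p.2) grid) = pvGridAts grid \ l.toFinset := by
  induction l generalizing grid with
  | nil => simp
  | cons p t ih =>
    simp only [List.foldl_cons, List.toFinset_cons]
    rw [ih _ (fun q hq => hl q (List.mem_cons_of_mem _ hq)),
      pv_gridAts_setDot (hl p List.mem_cons_self).1 (hl p List.mem_cons_self).2]
    ext q
    simp only [Finset.mem_sdiff, Finset.mem_singleton, Finset.mem_insert]
    constructor
    · rintro ⟨⟨h1, h2⟩, h3⟩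
      refine ⟨h1, ?_⟩
      rintro (h | h)
      · exact h2 (by simp [h])
      · exact h3 h
    · rintro ⟨h1, h2⟩
      exact ⟨⟨h1, fun h => h2 (Or.inl (by simp at h; simp [h]))⟩, fun h => h2 (Or.inr h)⟩

-- ---- A's loop computes pvAnsZ ----
theorem pv_loopA_eq (grid : List (List String)) (total : Int) :
    pvLoopA grid total = total + pvAnsZ (pvGridAts grid) := by
  induction grid, total using pvLoopA.induct with
  | case1 grid total h =>
    rw [pvLoopA, if_pos h]
    have hempty : pvToMove grid = [] := List.eq_nil_of_length_eq_zero h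
    have hcore : pvIsCore (pvGridAts grid) := by
      intro p hp
      by_contra hlt
      have : p ∈ pvToMove grid := pv_mem_toMove.2 ⟨hp, by omega⟩
      simp [hempty] at this
    rw [pvAnsZ, pvMaxCore_eq_self hcore]
    ring
  | case2 grid total h ih =>
    rw [pvLoopA, if_neg h, ih]
    have hl : ∀ p ∈ pvToMove grid, 0 ≤ p.1 ∧ 0 ≤ p.2 := by
      intro p hp
      have := pv_toMove_mem hp
      exact ⟨this.1, this.2.2.1⟩
    rw [pv_gridAts_foldl _ _ hl]
    have hRsub : (pvToMove grid).toFinset ⊆ pvGridAts grid := by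
      intro x hx
      exact (pv_mem_toMove.1 (List.mem_toFinset.1 hx)).1
    have hR : ∀ p ∈ (pvToMove grid).toFinset,
        p ∈ pvGridAts grid ∧ pvDeg (pvGridAts grid) p < 4 := by
      intro p hp
      exact pv_mem_toMove.1 (List.mem_toFinset.1 hp)
    rw [pvAnsZ, pvAnsZ, pvMaxCore_sdiff hR, Finset.card_sdiff,
      Finset.inter_eq_left.2 hRsub]
    have hcard : (pvToMove grid).toFinset.card = (pvToMove grid).length :=
      List.toFinset_card_of_nodup (pv_nodup_toMove grid)
    have hle : (pvToMove grid).toFinset.card ≤ (pvGridAts grid).card :=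
      Finset.card_le_card hRsub
    push_cast [Nat.cast_sub hle]
    omega

-- ---- port B abstractly ----
theorem pv_offsetsB_eq : pvOffsetsB = pvOffsets := rfl

theorem pv_build_pair (l : List (Int × Int)) (P : Int × Int → Bool)
    (s : PySem.Set (Int × Int)) (acc : List (Int × Int)) :
    l.foldl (fun st q => if P q then (PySem.Set.add st.1 q, st.2 ++ [q]) else st) (s, acc)
      = (PySem.Set.update s (l.filter P), acc ++ l.filter P) := by
  induction l generalizing s acc with
  | nil => simp [PySem.Set.update_nil]
  | cons q t ih =>
    by_cases h : P q = true
    · simp only [List.foldl_cons]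
      rw [if_pos h, ih, List.filter_cons_of_pos h, PySem.Set.update_cons]
      simp
    · simp only [List.foldl_cons]
      rw [if_neg h, ih, List.filter_cons_of_neg (by simpa using h)]

theorem pv_buildB_eq (grid : List (List String)) :
    pvBuildB grid = (pvAliveL grid, pvAliveL grid) := by
  have hinner : ∀ (st : PySem.Set (Int × Int) × List (Int × Int)) (r : Int),
      (PySem.List.pyRange 0 ((grid.headD []).length : Int) 1).foldl (fun st c =>
        if pvCellB grid r c = "@" then (PySem.Set.add st.1 (r, c), st.2 ++ [(r, c)]) else st) st
      = ((PySem.List.pyRange 0 ((grid.headD []).length : Int) 1).map (fun c => (r, c))).foldl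
          (fun st (q : Int × Int) => if (decide (pvCell grid q.1 q.2 = "@")) = true
            then (PySem.Set.add st.1 q, st.2 ++ [q]) else st) st := by
    intro st r
    rw [List.foldl_map]
    refine PySem.List.foldl_congr_mem _ _ _ _ (fun st c _ => ?_)
    by_cases h : pvCellB grid r c = "@"
    · have h' : pvCell grid r c = "@" := h
      simp [h, h']
    · have h' : ¬ pvCell grid r c = "@" := h
      simp [h, h']
  unfold pvBuildB
  rw [PySem.List.foldl_congr_mem _ _
      (fun st r => ((PySem.List.pyRange 0 ((grid.headD []).length : Int) 1).map
          (fun c => (r, c))).foldl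
        (fun st (q : Int × Int) => if (decide (pvCell grid q.1 q.2 = "@")) = true
          then (PySem.Set.add st.1 q, st.2 ++ [q]) else st) st) _
      (fun st r _ => hinner st r),
    ← List.foldl_flatMap]
  rw [show (PySem.Set.empty : PySem.Set (Int × Int)) = [] from rfl]
  rw [pv_build_pair _ (fun q : Int × Int => decide (pvCell grid q.1 q.2 = "@"))]
  rw [PySem.Set.update_nil_left]
  have hfin : PySem.Set.ofList (pvAliveL grid) = pvAliveL grid :=
    PySem.Set.ofList_eq_self_of_nodup _ (pv_nodup_aliveL grid)
  simp only [pvPairs, pvAliveL] at hfin ⊢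
  rw [hfin]
  simp

theorem pv_degB_eq (alive removed : PySem.Set (Int × Int)) (r c : Int) :
    pvDegB alive removed r c
      = ((pvDeg (alive.toFinset \ removed.toFinset) (r, c) : Nat) : Int) := by
  unfold pvDegB pvDeg
  rw [PySem.List.foldl_count_if (fun o : Int × Int =>
      PySem.Set.contains alive (r + o.1, c + o.2)
        && !PySem.Set.contains removed (r + o.1, c + o.2)),
    ← List.countP_eq_length_filter, pv_offsetsB_eq]
  have hc : ∀ o ∈ pvOffsets,
      (PySem.Set.contains alive (r + o.1, c + o.2)
        && !PySem.Set.contains removed (r + o.1, c + o.2)) = true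
      ↔ decide ((r + o.1, c + o.2) ∈ alive.toFinset \ removed.toFinset) = true := by
    intro o _
    by_cases h1 : (r + o.1, c + o.2) ∈ alive <;>
      by_cases h2 : (r + o.1, c + o.2) ∈ removed <;>
      simp [h1, h2, PySem.Set.contains_eq_listContains, Finset.mem_sdiff]
  rw [List.countP_congr hc]
  simp

theorem pv_mem_pushB {alive removed : PySem.Set (Int × Int)} {r c : Int}
    {w : List (Int × Int)} {q : Int × Int} :
    q ∈ pvPushB alive removed r c w ↔ q ∈ w ∨ ∃ o ∈ pvOffsetsB,
      q = (r + o.1, c + o.2) ∧ q ∈ alive ∧ q ∉ removed := by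
  unfold pvPushB
  rw [PySem.List.foldl_append_if (fun o : Int × Int =>
      PySem.Set.contains alive (r + o.1, c + o.2)
        && !PySem.Set.contains removed (r + o.1, c + o.2))
    (fun o : Int × Int => (r + o.1, c + o.2))]
  simp only [List.mem_append, List.mem_map, List.mem_filter, Bool.and_eq_true,
    Bool.not_eq_true', PySem.Set.contains_eq_listContains, List.contains_eq_mem,
    decide_eq_true_eq, decide_eq_false_iff_not]
  constructor
  · rintro (hw | ⟨o, ⟨ho, h1, h2⟩, rfl⟩)
    · exact Or.inl hw
    · exact Or.inr ⟨o, ho, rfl, h1, h2⟩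
  · rintro (hw | ⟨o, ho, rfl, h1, h2⟩)
    · exact Or.inl hw
    · exact Or.inr ⟨o, ⟨ho, h1, h2⟩, rfl⟩

theorem pv_deg_sdiff_eq {S : Finset (Int × Int)} {p q : Int × Int}
    (h : ∀ o ∈ pvOffsets, (q.1 + o.1, q.2 + o.2) ≠ p) :
    pvDeg (S \ {p}) q = pvDeg S q := by
  unfold pvDeg
  rw [← List.countP_eq_length_filter, ← List.countP_eq_length_filter]
  refine List.countP_congr (fun o ho => ?_)
  simp only [Finset.mem_sdiff, Finset.mem_singleton, decide_eq_true_eq]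
  have := h o ho
  tauto

theorem pv_offsets_neg : ∀ o ∈ pvOffsets, ((-o.1, -o.2) : Int × Int) ∈ pvOffsets := by decide

-- ---- B's loop computes pvAnsZ ----
theorem pv_loopB_eq (alive removed : PySem.Set (Int × Int)) (work : List (Int × Int))
    (hRnd : removed.Nodup) (hRsub : ∀ q ∈ removed, q ∈ alive)
    (hW : ∀ q ∈ work, q ∈ alive)
    (hstack : ∀ q ∈ alive, q ∉ removed →
      pvDeg (alive.toFinset \ removed.toFinset) q < 4 → q ∈ work) :
    pvLoopB alive removed work
      = (removed.length : Int) + pvAnsZ (alive.toFinset \ removed.toFinset) := by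
  revert hRnd hRsub hW hstack
  induction removed, work using pvLoopB.induct (alive := alive) with
  | case1 removed =>
    intro h1 h2 h3 h4
    rw [pvLoopB]
    have hcore : pvIsCore (alive.toFinset \ removed.toFinset) := by
      intro q hq
      rw [Finset.mem_sdiff, List.mem_toFinset, List.mem_toFinset] at hq
      by_contra hlt
      have := h4 q hq.1 hq.2 (by omega)
      simp at this
    rw [pvAnsZ, pvMaxCore_eq_self hcore]
    ring
  | case2 removed p rest hguard ih =>
    intro h1 h2 h3 h4
    rw [pvLoopB, if_pos hguard]
    have hpa : p ∈ alive := h3 p List.mem_cons_self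
    have hpr : p ∈ removed := by
      have hca : PySem.Set.contains alive p = true := (PySem.Set.contains_iff _ _).2 hpa
      simp only [hca, Bool.not_true, Bool.or_false] at hguard
      exact (PySem.Set.contains_iff _ _).1 hguard
    refine ih h1 h2 (fun q hq => h3 q (List.mem_cons_of_mem _ hq)) ?_
    intro q hqa hqr hdq
    rcases List.mem_cons.1 (h4 q hqa hqr hdq) with rfl | hm
    · exact absurd hpr hqr
    · exact hm
  | case3 removed p rest hguard hdeg ih =>
    intro h1 h2 h3 h4
    rw [pvLoopB, if_neg hguard, if_pos hdeg]
    have hpa : p ∈ alive := by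
      by_contra hn
      apply hguard
      have hf : PySem.Set.contains alive p = false := by
        rcases h : PySem.Set.contains alive p
        · rfl
        · exact absurd ((PySem.Set.contains_iff _ _).1 h) hn
      rw [hf]
      simp
    have hpr : p ∉ removed := by
      intro hm
      exact hguard (by rw [(PySem.Set.contains_iff removed p).2 hm]; simp)
    have hdegp : pvDeg (alive.toFinset \ removed.toFinset) p < 4 := by
      rw [pv_degB_eq] at hdeg
      simpa using hdeg
    have hpA' : p ∈ alive.toFinset \ removed.toFinset := by
      simp [Finset.mem_sdiff, List.mem_toFinset, hpa, hpr]
    have hadd : removed.add p = removed ++ [p] := PySem.Set.add_of_not_mem hpr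
    have hmemadd : ∀ q, q ∈ removed.add p ↔ q ∈ removed ∨ q = p := by
      intro q
      rw [hadd]
      simp
    have hRnd' : (removed.add p).Nodup := by
      rw [hadd]
      simp [List.nodup_append, h1]
      intro a b hm he
      exact hpr (he ▸ hm)
    have hTF : (removed.add p).toFinset = insert p removed.toFinset := by
      ext x
      simp [hmemadd x, or_comm]
    have hA'' : alive.toFinset \ (removed.add p).toFinset
        = (alive.toFinset \ removed.toFinset).erase p := by
      rw [hTF]
      ext x
      simp only [Finset.mem_erase, Finset.mem_sdiff, Finset.mem_insert]
      tauto
    have hmc : pvMaxCore ((alive.toFinset \ removed.toFinset).erase p)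
        = pvMaxCore (alive.toFinset \ removed.toFinset) := by
      rw [Finset.erase_eq]
      refine pvMaxCore_sdiff ?_
      intro x hx
      rw [Finset.mem_singleton] at hx
      subst hx
      exact ⟨hpA', hdegp⟩
    have hRsub' : ∀ q ∈ removed.add p, q ∈ alive := by
      intro q hq
      rcases (hmemadd q).1 hq with hq | rfl
      · exact h2 q hq
      · exact hpa
    have hW' : ∀ q ∈ pvPushB alive (removed.add p) p.1 p.2 rest, q ∈ alive := by
      intro q hq
      rcases pv_mem_pushB.1 hq with hq | ⟨o, _, _, hqa, _⟩
      · exact h3 q (List.mem_cons_of_mem _ hq)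
      · exact hqa
    have hstack' : ∀ q ∈ alive, q ∉ removed.add p →
        pvDeg (alive.toFinset \ (removed.add p).toFinset) q < 4 →
        q ∈ pvPushB alive (removed.add p) p.1 p.2 rest := by
      intro q hqa hqr' hdq
      have hqr : q ∉ removed := fun hm => hqr' ((hmemadd q).2 (Or.inl hm))
      have hqp : q ≠ p := fun he => hqr' ((hmemadd q).2 (Or.inr he))
      rw [hA'', Finset.erase_eq] at hdq
      by_cases hlt : pvDeg (alive.toFinset \ removed.toFinset) q < 4
      · rcases List.mem_cons.1 (h4 q hqa hqr hlt) with rfl | hm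
        · exact absurd rfl hqp
        · exact pv_mem_pushB.2 (Or.inl hm)
      · by_cases hex : ∃ o ∈ pvOffsets, (q.1 + o.1, q.2 + o.2) = p
        · obtain ⟨o, ho, hqo⟩ := hex
          have hc1 : q.1 + o.1 = p.1 := congrArg Prod.fst hqo
          have hc2 : q.2 + o.2 = p.2 := congrArg Prod.snd hqo
          refine pv_mem_pushB.2 (Or.inr ⟨(-o.1, -o.2), ?_, ?_, hqa, hqr'⟩)
          · rw [pv_offsetsB_eq]
            exact pv_offsets_neg o ho
          · have : q = (q.1, q.2) := rfl
            rw [this]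
            simp only [Prod.mk.injEq]
            constructor <;> omega
        · exfalso
          push Not at hex
          rw [pv_deg_sdiff_eq hex] at hdq
          exact hlt hdq
    rw [ih hRnd' hRsub' hW' hstack']
    have hlen : (removed.add p).length = removed.length + 1 := by
      rw [hadd]
      simp
    rw [hA'']
    have hcard : ((alive.toFinset \ removed.toFinset).erase p).card
        = (alive.toFinset \ removed.toFinset).card - 1 :=
      Finset.card_erase_of_mem hpA'
    have hpos : 1 ≤ (alive.toFinset \ removed.toFinset).card :=
      Finset.card_pos.2 ⟨p, hpA'⟩
    rw [pvAnsZ, pvAnsZ, hmc, hcard, hlen]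
    push_cast [Nat.cast_sub hpos]
    ring
  | case4 removed p rest hguard hdeg ih =>
    intro h1 h2 h3 h4
    rw [pvLoopB, if_neg hguard, if_neg hdeg]
    refine ih h1 h2 (fun q hq => h3 q (List.mem_cons_of_mem _ hq)) ?_
    intro q hqa hqr hdq
    rcases List.mem_cons.1 (h4 q hqa hqr hdq) with rfl | hm
    · exfalso
      rw [pv_degB_eq] at hdeg
      have : pvDeg (alive.toFinset \ removed.toFinset) q < 4 := by simpa using hdq
      exact hdeg (by simpa using this)
    · exact hm

-- ===== VERDICT (by name: the statement is the Claim_ definition above) =====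
theorem part2_spec : Claim_equal_part2 := by
  unfold Claim_equal_part2
  intro grid _ _
  unfold Spec_part2 part2 part2_alt
  rw [pv_loopA_eq, pv_buildB_eq]
  show 0 + pvAnsZ (pvGridAts grid)
    = pvLoopB (pvAliveL grid) PySem.Set.empty (pvAliveL grid)
  rw [show (PySem.Set.empty : PySem.Set (Int × Int)) = [] from rfl]
  rw [pv_loopB_eq (pvAliveL grid) [] (pvAliveL grid)
    List.nodup_nil (by simp) (fun q hq => hq) (fun q hq _ _ => hq)]
  simp [pvGridAts]
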